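-- pv_equiv track=rewrite | github.com/sukminc/hero-performance-os | app/api/field_ecology.py | _count_limpers
-- ===== SOURCE A (Python) =====
-- def _count_limpers(preflop_rows: list[str]) -> int:
--     limpers = 0
--     prior_raise = False
--     for row in preflop_rows:
--         if ":" not in row:
--             continue
--         actor, remainder = row.split(":", 1)
--         if actor == "Hero":
--             continue
--         remainder = remainder.strip()
--         if remainder.startswith("calls ") and not prior_raise:
--             limpers += 1
--         elif remainder.startswith("raises "):
--             prior_raise = True
--     return limpers
-- ===== SOURCE B (Python) =====
-- def _count_limpers(preflop_rows: list[str]) -> int: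
--     # Parse once into the list of non-Hero preflop actions, then count the
--     # 'calls ' entries in the prefix before the first 'raises ' entry.
--     actions = []
--     for row in preflop_rows:
--         if ":" in row:
--             actor, remainder = row.split(":", 1)
--             if actor != "Hero":
--                 actions.append(remainder.strip())
--     boundary = next((i for i, act in enumerate(actions) if act.startswith("raises ")), len(actions))
--     return sum(1 for act in actions[:boundary] if act.startswith("calls "))
-- ===== Notes on version B (the rewrite author's own statement) =====
-- stated objective: idiomatic
-- what changed: Replaces A's single stateful scan with a prior_raise flag by a parse-then-count decomposition: build the list of non-Hero actions once, locate the first 'raises ' action as an explicit boundary, and count the 'calls ' actions in the prefix before it.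
import Mathlib
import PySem

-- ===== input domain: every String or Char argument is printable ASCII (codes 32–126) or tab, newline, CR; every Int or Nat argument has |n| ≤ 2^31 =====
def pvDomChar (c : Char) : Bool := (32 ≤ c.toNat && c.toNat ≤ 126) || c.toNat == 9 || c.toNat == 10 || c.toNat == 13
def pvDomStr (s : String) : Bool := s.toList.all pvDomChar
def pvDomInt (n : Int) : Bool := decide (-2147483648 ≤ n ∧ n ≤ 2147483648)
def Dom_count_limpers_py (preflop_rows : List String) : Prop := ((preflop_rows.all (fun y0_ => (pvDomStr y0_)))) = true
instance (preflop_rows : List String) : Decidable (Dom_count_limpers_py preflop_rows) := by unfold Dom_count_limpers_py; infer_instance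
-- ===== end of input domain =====

-- B replaces A's stateful prior-raise flag with a parse-then-boundary-then-count decomposition (same O(n) cost; objective: idiomatic).


-- ===== PORT A =====
-- loop body of A, on state (limpers, prior_raise)
def stepA (st : Int × Bool) (row : String) : Int × Bool :=
  if !(PySem.Str.isIn ":" row) then st          -- if ":" not in row: continue
  else
    match PySem.Str.splitMax? row ":" 1 with    -- actor, remainder = row.split(":", 1)
    | some [actor, remainder] =>
        if actor == "Hero" then st              -- if actor == "Hero": continue
        else
          let r := PySem.Str.strip remainder
          if PySem.Str.startswith r "calls " && !st.2 then (st.1 + 1, st.2)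
          else if PySem.Str.startswith r "raises " then (st.1, true)
          else st
    | _ => st                                   -- unreachable: ':' ∈ row gives exactly two parts

def count_limpers_py (preflop_rows : List String) : Int :=
  (preflop_rows.foldl stepA ((0 : Int), false)).1

-- ===== PORT B =====
-- loop body of B: append the row's stripped non-Hero action, if any
def stepB (acc : List String) (row : String) : List String :=
  if PySem.Str.isIn ":" row then
    match PySem.Str.splitMax? row ":" 1 with
    | some [actor, remainder] =>
        if actor != "Hero" then acc ++ [PySem.Str.strip remainder] else acc
    | _ => acc
  else acc

def count_limpers_py_alt (preflop_rows : List String) : Int :=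
  let actions := preflop_rows.foldl stepB []
  let boundary := actions.findIdx (fun act => PySem.Str.startswith act "raises ")
  (((actions.take boundary).countP (fun act => PySem.Str.startswith act "calls ") : Nat) : Int)

-- ===== PRECONDITION & SPEC =====
def Spec_count_limpers_py (preflop_rows : List String) (out : Int) : Prop := out = count_limpers_py_alt preflop_rows
instance (preflop_rows : List String) (out : Int) : Decidable (Spec_count_limpers_py preflop_rows out) := by unfold Spec_count_limpers_py; infer_instance

-- ===== CLAIM (what is proved, stated in full; the proofs are below) =====
def Claim_equal_count_limpers_py : Prop := ∀ (preflop_rows : List String), Dom_count_limpers_py preflop_rows → Spec_count_limpers_py preflop_rows (count_limpers_py preflop_rows)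

-- ===== LEMMAS AND PROOFS =====

-- action-level step: A's inner calls/raises branches, applied to one parsed action
def stepAct (st : Int × Bool) (a : String) : Int × Bool :=
  if PySem.Str.startswith a "calls " && !st.2 then (st.1 + 1, st.2)
  else if PySem.Str.startswith a "raises " then (st.1, true)
  else st

lemma portA_eq (rows : List String) :
    count_limpers_py rows = (rows.foldl stepA ((0 : Int), false)).1 := rfl

lemma portB_eq (rows : List String) :
    count_limpers_py_alt rows =
      (((rows.foldl stepB []).take ((rows.foldl stepB []).findIdx
          (fun act => PySem.Str.startswith act "raises "))).countP
          (fun act => PySem.Str.startswith act "calls ") : Nat) := rfl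

-- one row of A equals folding the (0 or 1) actions that row contributes in B
lemma stepA_eq_foldl (st : Int × Bool) (row : String) :
    stepA st row = (stepB [] row).foldl stepAct st := by
  unfold stepA stepB
  by_cases h : PySem.Str.isIn ":" row = true
  · simp only [h, Bool.not_true, if_true, if_false, Bool.false_eq_true]
    match PySem.Str.splitMax? row ":" 1 with
    | some [actor, remainder] =>
        by_cases ha : actor == "Hero"
        · have he : actor = "Hero" := by simpa using ha
          simp [he]
        · simp only [ha, Bool.not_false, if_false, bne, if_true,
            List.nil_append, List.foldl, Bool.false_eq_true]
          rfl
    | none => rfl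
    | some [] => rfl
    | some [x] => rfl
    | some (x :: y :: z :: t) => rfl
  · simp only [Bool.not_eq_true] at h
    simp only [PySem.Str.isIn_eq] at h
    have h' : PySem.Chars.isIn [':'] row.toList = false := h
    simp [h']

lemma stepB_shift (acc : List String) (row : String) :
    stepB acc row = acc ++ stepB [] row := by
  unfold stepB
  by_cases h : PySem.Str.isIn ":" row = true
  · simp only [h, if_true]
    match PySem.Str.splitMax? row ":" 1 with
    | some [actor, remainder] =>
        by_cases ha : actor != "Hero" <;> simp [ha]
    | none => simp
    | some [] => simp
    | some [x] => simp
    | some (x :: y :: z :: t) => simp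
  · simp only [Bool.not_eq_true] at h
    simp only [PySem.Str.isIn_eq] at h
    have h' : PySem.Chars.isIn [':'] row.toList = false := h
    simp [h']

lemma foldl_stepB_shift (rows : List String) (acc : List String) :
    rows.foldl stepB acc = acc ++ rows.foldl stepB [] := by
  induction rows generalizing acc with
  | nil => simp
  | cons r t ih =>
      simp only [List.foldl_cons]
      rw [ih (stepB acc r), ih (stepB [] r), stepB_shift acc r, List.append_assoc]

lemma foldA_eq_foldAct (rows : List String) (st : Int × Bool) :
    rows.foldl stepA st = (rows.foldl stepB []).foldl stepAct st := by
  induction rows generalizing st with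
  | nil => rfl
  | cons r t ih =>
      simp only [List.foldl_cons]
      rw [ih (stepA st r), foldl_stepB_shift t (stepB [] r), List.foldl_append,
        stepA_eq_foldl st r]

lemma calls_not_raises (a : String) (h : PySem.Str.startswith a "calls " = true) :
    PySem.Str.startswith a "raises " = false := by
  by_contra hr
  simp only [Bool.not_eq_false] at hr
  simp only [PySem.Str.startswith, PySem.Chars.startswith] at h hr
  rw [List.isPrefixOf_iff_prefix] at h hr
  have e1 : "calls ".toList = ['c','a','l','l','s',' '] := rfl
  have e2 : "raises ".toList = ['r','a','i','s','e','s',' '] := rfl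
  rw [e1] at h; rw [e2] at hr
  obtain ⟨t1, ht1⟩ := h
  obtain ⟨t2, ht2⟩ := hr
  rw [← ht1] at ht2
  simp at ht2

lemma foldAct_true (acts : List String) (l : Int) :
    acts.foldl stepAct (l, true) = (l, true) := by
  induction acts generalizing l with
  | nil => rfl
  | cons a t ih =>
      simp only [List.foldl_cons]
      have : stepAct (l, true) a = (l, true) := by
        unfold stepAct
        simp only [Bool.not_true, Bool.and_false, if_false, Bool.false_eq_true]
        split <;> rfl
      rw [this, ih]

lemma foldAct_count (acts : List String) (l : Int) :
    (acts.foldl stepAct (l, false)).1 =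
      l + (((acts.take (acts.findIdx (fun act => PySem.Str.startswith act "raises "))).countP
              (fun act => PySem.Str.startswith act "calls ") : Nat) : Int) := by
  induction acts generalizing l with
  | nil => simp
  | cons a t ih =>
      simp only [List.foldl_cons, List.findIdx_cons]
      by_cases hc : PySem.Str.startswith a "calls " = true
      · have hr := calls_not_raises a hc
        have hs : stepAct (l, false) a = (l + 1, false) := by
          unfold stepAct; rw [hc]; rfl
        rw [hs, ih (l + 1)]
        simp only [hr, cond_false, List.take_succ_cons, List.countP_cons, hc]
        push_cast
        ring
      · simp only [Bool.not_eq_true] at hc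
        have hs : stepAct (l, false) a =
            (if PySem.Str.startswith a "raises " then (l, true) else (l, false)) := by
          unfold stepAct; rw [hc]; rfl
        by_cases hr : PySem.Str.startswith a "raises " = true
        · rw [hs]; simp only [hr, if_true, foldAct_true]
          simp
        · simp only [Bool.not_eq_true] at hr
          rw [hs]
          simp only [hr, if_false, Bool.false_eq_true, cond_false, List.take_succ_cons,
            List.countP_cons, ih l]
          simpa using hc

-- ===== VERDICT (by name: the statement is the Claim_ definition above) =====
theorem count_limpers_py_spec : Claim_equal_count_limpers_py := by
  intro rows _
  unfold Spec_count_limpers_py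
  rw [portA_eq, portB_eq, foldA_eq_foldAct, foldAct_count]
  simp
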